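-- pv_equiv track=rewrite | github.com/sihanchen01/cp2410 | Week10/q3.py | in_place_sort
-- ===== SOURCE A (Python) =====
-- def in_place_sort(A: list[int]) -> list:
--     """ Sort all 0s before 1s in place. """
--     i, j = 0, len(A) - 1
--     # from left to right, find first 1 at index i
--     for i in range(len(A)):
--         if A[i] == 1:
--             break
--     # from right to left, find first 0 at index j
--     for j in range(len(A)-1, -1, -1):
--         if A[j] == 0:
--             break
--     # if i and j meet, the list is sorted
--     if i > j:
--         return A
--     else:
--         # swap i, j
--         A[i] = 0
--         A[j] = 1
--         return in_place_sort(A)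
-- ===== SOURCE B (Python) =====
-- def in_place_sort(A: list[int]) -> list:
--     """ Sort all 0s before 1s in place.
--
--     Single counting pass: count the zeros once, then rewrite the 0/1 entries
--     left to right (zeros first, then ones), leaving any other value in place.
--     """
--     zeros = A.count(0)
--     for k in range(len(A)):
--         if A[k] == 0 or A[k] == 1:
--             if zeros > 0:
--                 A[k] = 0
--                 zeros -= 1
--             else:
--                 A[k] = 1
--     return A
-- ===== Notes on version B (the rewrite author's own statement) =====
-- stated objective: alternative
-- what changed: A repeatedly rescans the whole list from both ends and recurses once per swap; B counts the zeros once and rewrites the 0/1 entries in a single left-to-right pass (zeros first, then ones), leaving other values in place.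
-- intended difference: On lists of length >= 2 that contain no 1 and end in 0 (e.g. [0, 0]), A corrupts the data by turning the last 0 into a 1, while B leaves the list unchanged, which is the intended result since such a list is already sorted (0s before 1s). — e.g. on in_place_sort([0, 0]): A returns [0, 1], B returns [0, 0]
import Mathlib
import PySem

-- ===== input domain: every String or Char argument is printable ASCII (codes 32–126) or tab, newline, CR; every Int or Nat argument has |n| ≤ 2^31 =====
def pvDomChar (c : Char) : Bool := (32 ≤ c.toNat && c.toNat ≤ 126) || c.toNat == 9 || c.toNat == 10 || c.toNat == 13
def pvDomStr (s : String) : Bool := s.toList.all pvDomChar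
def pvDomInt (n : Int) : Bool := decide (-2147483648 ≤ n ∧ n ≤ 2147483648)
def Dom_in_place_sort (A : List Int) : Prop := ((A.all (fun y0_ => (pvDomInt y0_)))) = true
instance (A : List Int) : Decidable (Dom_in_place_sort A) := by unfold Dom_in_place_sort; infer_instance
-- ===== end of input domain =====

-- B replaces A's rescan-and-recurse loop by one counting pass; both mutate the argument list
-- in place in Python, so the equivalence proved here is about the returned (= final) list value.

-- ===== PORT A =====
-- the first Python for-loop: index where it breaks (first element equal to 1), none if it never breaks
def firstOneAux : List Int → Option Nat
  | [] => none
  | x :: xs => if x = 1 then some 0 else (firstOneAux xs).map (· + 1)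

-- the second Python for-loop (right to left): index of the last element equal to 0, none if no break
def lastZeroAux : List Int → Option Nat
  | [] => none
  | x :: xs =>
    match lastZeroAux xs with
    | some k => some (k + 1)
    | none => if x = 0 then some 0 else none

-- the recursion of A, with a fuel guard for totality only (A.length + 2 steps always suffice
-- on inputs where the Python terminates; the 0-case is never reached under Pre_)
def ipsGo : Nat → List Int → List Int
  | 0, A => A
  | fuel + 1, A =>
    -- Python's i after the loop: break index, else len(A)-1 (0 for the empty list, the initial value)
    let i : Int := match firstOneAux A with
      | some k => (k : Int)
      | none => if A = [] then 0 else (A.length : Int) - 1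
    -- Python's j after the loop: break index, else 0 (len(A)-1 = -1 for the empty list)
    let j : Int := match lastZeroAux A with
      | some k => (k : Int)
      | none => if A = [] then -1 else 0
    if i > j then A
    else ipsGo fuel ((A.set i.toNat 0).set j.toNat 1)

def in_place_sort (A : List Int) : List Int := ipsGo (A.length + 2) A

-- ===== PORT B =====
-- the for-loop of Source B: rewrite each 0/1 entry, zeros while the counter lasts, then ones
def altGo : List Int → Int → List Int
  | [], _ => []
  | x :: xs, z =>
    if x = 0 ∨ x = 1 then
      if z > 0 then 0 :: altGo xs (z - 1) else 1 :: altGo xs z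
    else x :: altGo xs z

def in_place_sort_alt (A : List Int) : List Int :=
  altGo A ((PySem.List.count A 0 : Nat) : Int)

-- ===== PRECONDITION & SPEC =====
-- Pre_ excludes exactly the inputs on which the Python A recurses forever (RecursionError):
-- every singleton list, and nonempty lists that start with 1 and contain no 0.
def Pre_in_place_sort (A : List Int) : Prop :=
  ¬ (A.length = 1 ∨ (A ≠ [] ∧ A.headI = 1 ∧ ¬ (0 ∈ A)))
instance (A : List Int) : Decidable (Pre_in_place_sort A) := by
  unfold Pre_in_place_sort; infer_instance

def pvWitness_in_place_sort : List Int := [1, 0, 2, 1, 0]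

-- On lists of length ≥ 2 with no 1 that end in 0 (e.g. [0, 0]), A turns the last 0 into a 1,
-- while B leaves the list unchanged — the intended result, since such a list is already sorted.
def D_in_place_sort (A : List Int) : Prop :=
  2 ≤ A.length ∧ ¬ (1 ∈ A) ∧ A.getLast? = some 0
instance (A : List Int) : Decidable (D_in_place_sort A) := by
  unfold D_in_place_sort; infer_instance

def Spec_in_place_sort (A : List Int) (out : List Int) : Prop :=
  ¬ D_in_place_sort A → out = in_place_sort_alt A
instance (A : List Int) (out : List Int) : Decidable (Spec_in_place_sort A out) := by
  unfold Spec_in_place_sort; infer_instance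

def pvDiffWitness_in_place_sort : List Int := [0, 0]
def pvDiffWitnessOut_in_place_sort : (List Int) × (List Int) := ([0, 1], [0, 0])

-- ===== CLAIM (what is proved, stated in full; the proofs are below) =====
def Claim_unchanged_in_place_sort : Prop :=
  ∀ (A : List Int), Dom_in_place_sort A → Pre_in_place_sort A →
    Spec_in_place_sort A (in_place_sort A)
def Claim_changed_in_place_sort : Prop :=
  Dom_in_place_sort (pvDiffWitness_in_place_sort) ∧
  Pre_in_place_sort (pvDiffWitness_in_place_sort) ∧
  D_in_place_sort (pvDiffWitness_in_place_sort) ∧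
  in_place_sort (pvDiffWitness_in_place_sort) = pvDiffWitnessOut_in_place_sort.1 ∧
  in_place_sort_alt (pvDiffWitness_in_place_sort) = pvDiffWitnessOut_in_place_sort.2 ∧
  pvDiffWitnessOut_in_place_sort.1 ≠ pvDiffWitnessOut_in_place_sort.2
def Claim_exact_in_place_sort : Prop :=
  ∀ (A : List Int), Dom_in_place_sort A → Pre_in_place_sort A → D_in_place_sort A →
    in_place_sort A ≠ in_place_sort_alt A

-- ===== LEMMAS AND PROOFS =====

-- ---- loop characterisations ----
theorem firstOneAux_none_iff (A : List Int) : firstOneAux A = none ↔ ¬ (1 ∈ A) := by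
  induction A with
  | nil => simp [firstOneAux]
  | cons x xs ih =>
    by_cases hx : x = 1 <;> simp [firstOneAux, hx, ih, eq_comm]

theorem firstOneAux_some (A : List Int) (i : Nat) (h : firstOneAux A = some i) :
    A[i]? = some 1 ∧ ∀ k, A[k]? = some 1 → i ≤ k := by
  induction A generalizing i with
  | nil => simp [firstOneAux] at h
  | cons x xs ih =>
    by_cases hx : x = 1
    · simp [firstOneAux, hx] at h
      subst h; simp [hx]
    · simp [firstOneAux, hx] at h
      obtain ⟨i', hi', rfl⟩ := h
      obtain ⟨h1, h2⟩ := ih i' hi'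
      constructor
      · simpa using h1
      · intro k hk
        cases k with
        | zero => simp at hk; exact absurd hk hx
        | succ k => simp at hk; exact Nat.succ_le_succ (h2 k hk)

theorem firstOneAux_intro (A : List Int) (k : Nat) (h1 : A[k]? = some 1)
    (h2 : ∀ l, l < k → A[l]? ≠ some 1) : firstOneAux A = some k := by
  induction A generalizing k with
  | nil => simp at h1
  | cons x xs ih =>
    cases k with
    | zero =>
      simp at h1
      simp [firstOneAux, h1]
    | succ k =>
      have hx : x ≠ 1 := by
        intro hx
        exact h2 0 (Nat.succ_pos k) (by simp [hx])
      simp at h1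
      have := ih k h1 (fun l hl hbad => h2 (l + 1) (by omega) (by simpa using hbad))
      simp [firstOneAux, hx, this]

theorem lastZeroAux_none_iff (A : List Int) : lastZeroAux A = none ↔ ¬ (0 ∈ A) := by
  induction A with
  | nil => simp [lastZeroAux]
  | cons x xs ih =>
    cases hz : lastZeroAux xs with
    | some k =>
      have h0 : (0 : Int) ∈ xs := by
        by_contra hmem
        rw [ih.mpr hmem] at hz; cases hz
      simp [lastZeroAux, hz, h0]
    | none =>
      by_cases hx : x = 0 <;> simp [lastZeroAux, hz, hx, eq_comm, ih.mp hz]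

theorem lastZeroAux_some (A : List Int) (j : Nat) (h : lastZeroAux A = some j) :
    A[j]? = some 0 ∧ ∀ k, A[k]? = some 0 → k ≤ j := by
  induction A generalizing j with
  | nil => simp [lastZeroAux] at h
  | cons x xs ih =>
    cases hz : lastZeroAux xs with
    | some k =>
      simp [lastZeroAux, hz] at h
      subst h
      obtain ⟨h1, h2⟩ := ih k hz
      refine ⟨by simpa using h1, ?_⟩
      intro l hl
      cases l with
      | zero => omega
      | succ l => simp at hl; exact Nat.succ_le_succ (h2 l hl)
    | none =>
      by_cases hx : x = 0
      · simp [lastZeroAux, hz, hx] at h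
        subst h
        refine ⟨by simp [hx], ?_⟩
        intro l hl
        cases l with
        | zero => omega
        | succ l =>
          simp at hl
          exact absurd (List.mem_of_getElem? hl) ((lastZeroAux_none_iff xs).mp hz)
      · simp [lastZeroAux, hz, hx] at h

-- ---- unfolding equations for B's pass ----
theorem altGo_cons_zero (xs : List Int) (z : Int) (hz : z > 0) :
    altGo (0 :: xs) z = 0 :: altGo xs (z - 1) := by
  simp [altGo, hz]

theorem altGo_cons_one_nonpos (xs : List Int) (z : Int) (hz : ¬ z > 0) :
    altGo (1 :: xs) z = 1 :: altGo xs z := by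
  simp [altGo, hz]

theorem altGo_cons_other (x : Int) (xs : List Int) (z : Int) (hx : ¬ (x = 0 ∨ x = 1)) :
    altGo (x :: xs) z = x :: altGo xs z := by
  simp [altGo, hx]

-- ---- B is the identity on lists whose 0/1 entries are already sorted (all 0s before all 1s) ----
theorem altGo_sorted (A : List Int)
    (h : ∀ (k l : Nat), A[k]? = some 1 → A[l]? = some 0 → l < k) :
    altGo A ((List.count 0 A : Nat) : Int) = A := by
  induction A with
  | nil => simp [altGo]
  | cons x xs ih =>
    have hxs : ∀ (k l : Nat), xs[k]? = some 1 → xs[l]? = some 0 → l < k := by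
      intro k l hk hl
      have := h (k + 1) (l + 1) (by simpa using hk) (by simpa using hl)
      omega
    by_cases hx0 : x = 0
    · subst hx0
      have hc : ((List.count (0 : Int) (0 :: xs) : Nat) : Int)
          = ((List.count (0 : Int) xs : Nat) : Int) + 1 := by
        simp
      rw [hc, altGo_cons_zero xs _ (by positivity)]
      simp only [add_sub_cancel_right]
      rw [ih hxs]
    · by_cases hx1 : x = 1
      · subst hx1
        have h0 : ¬ ((0 : Int) ∈ (1 :: xs : List Int)) := by
          intro hmem
          rcases List.mem_iff_getElem?.mp hmem with ⟨l, hl⟩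
          have := h 0 l (by simp) hl
          omega
        have hc : List.count (0 : Int) (1 :: xs) = 0 := List.count_eq_zero.mpr h0
        have hcxs : List.count (0 : Int) xs = 0 :=
          List.count_eq_zero.mpr (fun hm => h0 (List.mem_cons_of_mem _ hm))
        have hrec := ih hxs
        rw [hcxs] at hrec
        rw [hc]
        rw [show (((0 : Nat) : Int)) = (0 : Int) from rfl]
        rw [altGo_cons_one_nonpos xs 0 (by omega)]
        simpa using hrec
      · have hc : List.count (0 : Int) (x :: xs) = List.count (0 : Int) xs := by
          simp [hx0]
        rw [hc, altGo_cons_other x xs _ (by tauto), ih hxs]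

-- ---- counting is stable under a swap-style update ----
theorem count_set_eq (A : List Int) (k : Nat) (a v c : Int) (h : A[k]? = some a) :
    List.count c (A.set k v) + (if a = c then 1 else 0)
      = List.count c A + (if v = c then 1 else 0) := by
  induction A generalizing k with
  | nil => simp at h
  | cons x xs ih =>
    cases k with
    | zero =>
      simp at h; subst h
      simp only [List.count_cons, beq_iff_eq, List.set]
      split_ifs <;> omega
    | succ k =>
      simp at h
      have := ih k h
      simp only [List.set, List.count_cons, beq_iff_eq]
      split_ifs at this ⊢ <;> omega

-- ---- B's pass only looks at whether an entry is binary, so rewriting a binary entry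
--      to another binary value does not change the result ----
theorem altGo_set_binary (A : List Int) (k : Nat) (a v : Int) (z : Int)
    (h : A[k]? = some a) (ha : a = 0 ∨ a = 1) (hv : v = 0 ∨ v = 1) :
    altGo (A.set k v) z = altGo A z := by
  induction A generalizing k z with
  | nil => simp at h
  | cons x xs ih =>
    cases k with
    | zero =>
      simp at h; subst h
      have hx : x = 0 ∨ x = 1 := ha
      simp only [List.set, altGo]
      simp [hx, hv]
    | succ k =>
      simp at h
      simp only [List.set, altGo]
      by_cases hx : x = 0 ∨ x = 1
      · by_cases hz : z > 0 <;> simp [hx, hz, ih k _ h]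
      · simp [hx, ih k _ h]

-- measure: recursion depth bound for A's loop
def ipsMeasure (A : List Int) : Nat :=
  (A.length - (firstOneAux A).getD (A.length - 1)) + (if 1 ∈ A then 0 else 1)

theorem ipsMeasure_pos (A : List Int) : 1 ≤ ipsMeasure A := by
  unfold ipsMeasure
  by_cases h1 : 1 ∈ A
  · have : firstOneAux A ≠ none := by
      intro hn; exact (firstOneAux_none_iff A).mp hn h1
    rcases Option.ne_none_iff_exists'.mp this with ⟨i, hi⟩
    have hlt : i < A.length := by
      have := (firstOneAux_some A i hi).1
      exact (List.getElem?_eq_some_iff.mp this).1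
    simp [hi, h1]; omega
  · simp [h1]

theorem ipsMeasure_le (A : List Int) : ipsMeasure A ≤ A.length + 1 := by
  unfold ipsMeasure
  split_ifs <;> omega

-- the step taken in the genuinely-unsorted case, and everything the induction needs about it
theorem step_facts (A : List Int) (i j : Nat)
    (hfo : firstOneAux A = some i) (hlz : lastZeroAux A = some j) (hij : i < j) :
    (0 ∈ (A.set i 0).set j 1) ∧ ((A.set i 0).set j 1).length = A.length ∧
    List.count 0 ((A.set i 0).set j 1) = List.count 0 A ∧
    in_place_sort_alt ((A.set i 0).set j 1) = in_place_sort_alt A ∧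
    ipsMeasure ((A.set i 0).set j 1) < ipsMeasure A := by
  obtain ⟨hA_i, hmin⟩ := firstOneAux_some A i hfo
  obtain ⟨hA_j, hmax⟩ := lastZeroAux_some A j hlz
  have hilen : i < A.length := (List.getElem?_eq_some_iff.mp hA_i).1
  have hjlen : j < A.length := (List.getElem?_eq_some_iff.mp hA_j).1
  have hA1_j : (A.set i 0)[j]? = some 0 := by
    rw [List.getElem?_set_ne (by omega)]; exact hA_j
  have hA'_i : ((A.set i 0).set j 1)[i]? = some 0 := by
    rw [List.getElem?_set_ne (by omega)]
    exact List.getElem?_set_self (by simpa using hilen)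
  have hA'_j : ((A.set i 0).set j 1)[j]? = some 1 :=
    List.getElem?_set_self (by simpa using hjlen)
  have hlen : ((A.set i 0).set j 1).length = A.length := by simp
  have hcount : List.count 0 ((A.set i 0).set j 1) = List.count 0 A := by
    have h1 := count_set_eq A i 1 0 0 hA_i
    have h2 := count_set_eq (A.set i 0) j 0 1 0 hA1_j
    simp at h1 h2
    omega
  have halt : in_place_sort_alt ((A.set i 0).set j 1) = in_place_sort_alt A := by
    unfold in_place_sort_alt
    rw [PySem.List.count_eq, PySem.List.count_eq, hcount]
    rw [altGo_set_binary (A.set i 0) j 0 1 _ hA1_j (Or.inl rfl) (Or.inr rfl)]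
    rw [altGo_set_binary A i 1 0 _ hA_i (Or.inr rfl) (Or.inl rfl)]
  have hmem1 : 1 ∈ A := List.mem_of_getElem? hA_i
  have hmem1' : (1 : Int) ∈ (A.set i 0).set j 1 := List.mem_of_getElem? hA'_j
  have hmeas : ipsMeasure ((A.set i 0).set j 1) < ipsMeasure A := by
    unfold ipsMeasure
    have hfo' : ∃ i', firstOneAux ((A.set i 0).set j 1) = some i' ∧ i < i' ∧
        i' < ((A.set i 0).set j 1).length := by
      have : firstOneAux ((A.set i 0).set j 1) ≠ none := by
        intro hn; exact (firstOneAux_none_iff _).mp hn hmem1'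
      rcases Option.ne_none_iff_exists'.mp this with ⟨i', hi'⟩
      obtain ⟨hv, _⟩ := firstOneAux_some _ i' hi'
      have hi'len : i' < ((A.set i 0).set j 1).length := (List.getElem?_eq_some_iff.mp hv).1
      refine ⟨i', hi', ?_, hi'len⟩
      rcases Nat.lt_or_ge i i' with h | h
      · exact h
      · exfalso
        rcases Nat.lt_or_ge i' i with h2 | h2
        · have : ((A.set i 0).set j 1)[i']? = A[i']? := by
            rw [List.getElem?_set_ne (by omega), List.getElem?_set_ne (by omega)]
          rw [this] at hv
          have := hmin i' hv
          omega
        · have : i' = i := by omega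
          subst this
          rw [hA'_i] at hv
          simp at hv
    rcases hfo' with ⟨i', hi', hlt, hi'len⟩
    simp [hi', hfo, hmem1, hmem1', hlen]
    omega
  have h0mem : (0 : Int) ∈ (A.set i 0).set j 1 := List.mem_of_getElem? hA'_i
  exact ⟨h0mem, hlen, hcount, halt, hmeas⟩

-- main induction: inside Pre_ and outside D_, A's recursion computes B's one-pass result
theorem ipsGo_eq (fuel : Nat) : ∀ (A : List Int), Pre_in_place_sort A → ¬ D_in_place_sort A →
    ipsMeasure A ≤ fuel → ipsGo fuel A = in_place_sort_alt A := by
  induction fuel with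
  | zero =>
    intro A _ _ hm
    have := ipsMeasure_pos A
    omega
  | succ fuel ih =>
    intro A hpre hd hm
    by_cases hnil : A = []
    · subst hnil
      simp only [ipsGo, in_place_sort_alt,
        show firstOneAux ([] : List Int) = none from rfl,
        show lastZeroAux ([] : List Int) = none from rfl, if_true]
      rw [if_pos (show (0 : Int) > -1 by norm_num)]
      rfl
    -- the four loop-outcome cases
    cases hfo : firstOneAux A with
    | none =>
      have h1 : ¬ (1 ∈ A) := (firstOneAux_none_iff A).mp hfo
      cases hlz : lastZeroAux A with
      | none =>
        -- neither a 1 nor a 0: i = len-1, j = 0; Pre_ rules out len = 1, so i > j and A is returned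
        have h0 : ¬ (0 ∈ A) := (lastZeroAux_none_iff A).mp hlz
        have hlen2 : 2 ≤ A.length := by
          rcases A with _ | ⟨x, _ | ⟨y, t⟩⟩
          · exact absurd rfl hnil
          · exact absurd (Or.inl rfl) hpre
          · simp
        have hsorted : altGo A ((List.count 0 A : Nat) : Int) = A := by
          apply altGo_sorted
          intro k l hk _
          exact absurd (List.mem_of_getElem? hk) h1
        simp only [ipsGo, hfo, hlz, if_neg hnil]
        rw [if_pos (show (↑A.length - 1 : Int) > 0 by omega)]
        unfold in_place_sort_alt
        rw [PySem.List.count_eq, hsorted]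
      | some j =>
        -- 0s but no 1: i = len-1; ¬D_ forces the last element ≠ 0, so j < len-1 and A is returned
        obtain ⟨hA_j, hmax⟩ := lastZeroAux_some A j hlz
        have hjlen : j < A.length := (List.getElem?_eq_some_iff.mp hA_j).1
        have hlen2 : 2 ≤ A.length := by
          rcases A with _ | ⟨x, _ | ⟨y, t⟩⟩
          · exact absurd rfl hnil
          · exact absurd (Or.inl rfl) hpre
          · simp
        have hjne : j ≠ A.length - 1 := by
          intro hj
          apply hd
          refine ⟨hlen2, h1, ?_⟩
          rw [List.getLast?_eq_getElem?, ← hj]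
          exact hA_j
        have hsorted : altGo A ((List.count 0 A : Nat) : Int) = A := by
          apply altGo_sorted
          intro k l hk _
          exact absurd (List.mem_of_getElem? hk) h1
        simp only [ipsGo, hfo, hlz, if_neg hnil]
        rw [if_pos (show (↑A.length - 1 : Int) > ((j : Nat) : Int) by omega)]
        unfold in_place_sort_alt
        rw [PySem.List.count_eq, hsorted]
    | some i =>
      obtain ⟨hA_i, hmin⟩ := firstOneAux_some A i hfo
      have hilen : i < A.length := (List.getElem?_eq_some_iff.mp hA_i).1
      cases hlz : lastZeroAux A with
      | none =>
        -- 1s but no 0: j = 0; Pre_ rules out head = 1, so i > 0 = j and A is returned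
        have h0 : ¬ (0 ∈ A) := (lastZeroAux_none_iff A).mp hlz
        have hipos : 0 < i := by
          rcases Nat.eq_zero_or_pos i with h | h
          swap
          · exact h
          · exfalso
            subst h
            apply hpre
            right
            refine ⟨hnil, ?_, h0⟩
            rcases A with _ | ⟨x, t⟩
            · exact absurd rfl hnil
            · simp at hA_i; simp [hA_i]
        have hsorted : altGo A ((List.count 0 A : Nat) : Int) = A := by
          apply altGo_sorted
          intro k l _ hl
          exact absurd (List.mem_of_getElem? hl) h0
        simp only [ipsGo, hfo, hlz, if_neg hnil]
        rw [if_pos (show ((i : Nat) : Int) > 0 by omega)]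
        unfold in_place_sort_alt
        rw [PySem.List.count_eq, hsorted]
      | some j =>
        obtain ⟨hA_j, hmax⟩ := lastZeroAux_some A j hlz
        rcases Nat.lt_or_ge j i with hji | hij
        · -- i > j: sorted, A is returned
          have hsorted : altGo A ((List.count 0 A : Nat) : Int) = A := by
            apply altGo_sorted
            intro k l hk hl
            have h1 := hmin k hk
            have h2 := hmax l hl
            omega
          simp only [ipsGo, hfo, hlz]
          rw [if_pos (show ((i : Nat) : Int) > ((j : Nat) : Int) by omega)]
          unfold in_place_sort_alt
          rw [PySem.List.count_eq, hsorted]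
        · -- i < j (i = j is impossible: A[i] = 1 ≠ 0 = A[j]): one swap step, then induction
          have hne : i ≠ j := by
            intro h; rw [h, hA_j] at hA_i; simp at hA_i
          have hij' : i < j := by omega
          have hfacts := step_facts A i j hfo hlz hij'
          obtain ⟨h0mem, hlen, _, halt, hmeas⟩ := hfacts
          have hjlen : j < A.length := (List.getElem?_eq_some_iff.mp hA_j).1
          simp only [ipsGo, hfo, hlz]
          rw [if_neg (show ¬ (((i : Nat) : Int) > ((j : Nat) : Int)) by omega)]
          have hto_i : ((i : Nat) : Int).toNat = i := by simp
          have hto_j : ((j : Nat) : Int).toNat = j := by simp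
          rw [hto_i, hto_j]
          have hpre' : Pre_in_place_sort ((A.set i 0).set j 1) := by
            intro hbad
            rcases hbad with hb | ⟨_, _, hb0⟩
            · rw [hlen] at hb; omega
            · exact hb0 h0mem
          have hd' : ¬ D_in_place_sort ((A.set i 0).set j 1) := by
            intro ⟨_, hb1, _⟩
            exact hb1 (List.mem_of_getElem?
              (List.getElem?_set_self (i := j) (by simp; omega)))
          rw [ih ((A.set i 0).set j 1) hpre' hd' (by omega), halt]

-- ===== VERDICT (by name: the statement is the Claim_ definition above) =====
theorem in_place_sort_spec : Claim_unchanged_in_place_sort := by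
  intro A _ hpre hd
  show in_place_sort A = in_place_sort_alt A
  unfold in_place_sort
  exact ipsGo_eq (A.length + 2) A hpre hd (by have := ipsMeasure_le A; omega)

theorem in_place_sort_changed : Claim_changed_in_place_sort := by
  unfold Claim_changed_in_place_sort; decide

theorem in_place_sort_tight : Claim_exact_in_place_sort := by
  intro A _ hpre hd heq
  obtain ⟨hlen2, h1, hlast⟩ := hd
  have hnil : A ≠ [] := by intro h; subst h; simp at hlen2
  -- B leaves the already-sorted list unchanged
  have hBA : in_place_sort_alt A = A := by
    unfold in_place_sort_alt
    rw [PySem.List.count_eq]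
    apply altGo_sorted
    intro k l hk _
    exact absurd (List.mem_of_getElem? hk) h1
  -- A's first step turns the final 0 into a 1
  have hfo : firstOneAux A = none := (firstOneAux_none_iff A).mpr h1
  have hlastget : A[A.length - 1]? = some 0 := by
    rw [← List.getLast?_eq_getElem?]; exact hlast
  have h0mem : (0 : Int) ∈ A := List.mem_of_getElem? hlastget
  have hlzne : lastZeroAux A ≠ none := fun hn => (lastZeroAux_none_iff A).mp hn h0mem
  rcases Option.ne_none_iff_exists'.mp hlzne with ⟨j, hj⟩
  obtain ⟨hAj, hmax⟩ := lastZeroAux_some A j hj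
  have hjlen : j < A.length := (List.getElem?_eq_some_iff.mp hAj).1
  have hjeq : j = A.length - 1 := by
    have := hmax _ hlastget; omega
  subst hjeq
  have hstep1 : in_place_sort A = ipsGo (A.length + 1) (A.set (A.length - 1) 1) := by
    show ipsGo ((A.length + 1) + 1) A = _
    simp only [ipsGo, hfo, hj, if_neg hnil]
    rw [if_neg (show ¬ ((↑A.length - 1 : Int) > ((A.length - 1 : Nat) : Int)) by omega)]
    rw [show ((↑A.length - 1 : Int)).toNat = A.length - 1 by omega]
    rw [show (((A.length - 1 : Nat) : Int)).toNat = A.length - 1 by omega]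
    rw [List.set_set]
  -- after the step the list is sorted for A's tests, so it is returned as-is
  have hA2_n1 : (A.set (A.length - 1) 1)[A.length - 1]? = some 1 :=
    List.getElem?_set_self (by omega)
  have hfo2 : firstOneAux (A.set (A.length - 1) 1) = some (A.length - 1) := by
    apply firstOneAux_intro _ _ hA2_n1
    intro l hl hbad
    rw [List.getElem?_set_ne (by omega)] at hbad
    exact h1 (List.mem_of_getElem? hbad)
  have hnil2 : A.set (A.length - 1) 1 ≠ [] := by
    intro h
    rw [h] at hA2_n1
    simp at hA2_n1
  have hstep2 : ipsGo (A.length + 1) (A.set (A.length - 1) 1) = A.set (A.length - 1) 1 := by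
    obtain ⟨f, hf⟩ : ∃ f, A.length + 1 = f + 1 := ⟨A.length, rfl⟩
    rw [hf]
    cases hlz2 : lastZeroAux (A.set (A.length - 1) 1) with
    | none =>
      simp only [ipsGo, hfo2, hlz2, if_neg hnil2]
      rw [if_pos (show (((A.length - 1 : Nat) : Int)) > 0 by omega)]
    | some j2 =>
      obtain ⟨hAj2, _⟩ := lastZeroAux_some _ j2 hlz2
      have hj2len : j2 < A.length := by
        have := (List.getElem?_eq_some_iff.mp hAj2).1
        simpa using this
      have hj2ne : j2 ≠ A.length - 1 := by
        intro h
        rw [h, hA2_n1] at hAj2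
        simp at hAj2
      simp only [ipsGo, hfo2, hlz2]
      rw [if_pos (show (((A.length - 1 : Nat) : Int)) > ((j2 : Nat) : Int) by omega)]
  -- the returned list differs from A at the last position
  rw [hBA, hstep1, hstep2] at heq
  have := congrArg (fun l => l[A.length - 1]?) heq
  simp only at this
  rw [hA2_n1, hlastget] at this
  simp at this
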